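-- pv_equiv track=rewrite | github.com/TalbyWhistler/plotWriter | plotWriterF0.py | getNearestLowest
-- ===== SOURCE A (Python) =====
-- def getNearestLowest(xDistance,yDistance):
--     incrementorX=-(abs(xDistance)//xDistance)
--     incrementorY=-(abs(yDistance)//yDistance)
--     # gcd=math.gcd(abs(xDistance),abs(yDistance))
--     # incrementorX = incrementorX*gcd
--     # incrementorY = incrementorY*gcd
--     if (abs(xDistance)>abs(yDistance)):
--         while (abs(xDistance)%abs(yDistance) != 0):
--             xDistance += incrementorX
--         # xDistance is greater
--     else:
--         while (abs(yDistance)%abs(xDistance) !=0):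
--             yDistance += incrementorY
--         # yDistance is greater
--     return [xDistance,yDistance]
-- ===== SOURCE B (Python) =====
-- def getNearestLowest(xDistance, yDistance):
--     ax, ay = abs(xDistance), abs(yDistance)
--     if ax > ay:
--         r = ax % ay
--         xDistance -= r if xDistance > 0 else -r
--     else:
--         r = ay % ax
--         yDistance -= r if yDistance > 0 else -r
--     return [xDistance, yDistance]
-- ===== Notes on version B (the rewrite author's own statement) =====
-- stated objective: faster
-- what changed: Replaces the step-by-one while loop (O(|x|-|y|) iterations) with a single modulo: subtract abs(larger)%abs(smaller) from the larger coordinate, preserving its sign.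
import Mathlib
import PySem

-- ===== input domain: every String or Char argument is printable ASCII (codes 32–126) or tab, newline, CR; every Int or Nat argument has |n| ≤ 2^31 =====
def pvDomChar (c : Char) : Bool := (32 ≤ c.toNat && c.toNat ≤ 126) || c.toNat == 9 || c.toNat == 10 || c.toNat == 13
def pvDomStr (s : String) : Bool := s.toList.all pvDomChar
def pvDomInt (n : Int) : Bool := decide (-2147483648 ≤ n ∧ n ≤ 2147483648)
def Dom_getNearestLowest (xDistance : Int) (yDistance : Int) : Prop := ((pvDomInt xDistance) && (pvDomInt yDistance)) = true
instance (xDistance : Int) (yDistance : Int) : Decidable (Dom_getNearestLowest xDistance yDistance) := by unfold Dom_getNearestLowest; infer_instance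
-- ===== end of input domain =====

-- B replaces A's step-by-one while loop with one modulo subtraction (timed asymptotically faster).

-- ===== PORT A =====
-- the while loop: while abs(v) % ad != 0: v += inc   (fuel = enough iterations; the
-- equivalence proof shows v.natAbs + 1 always suffices)
def gnlLoop (fuel : Nat) (ad inc v : Int) : Int :=
  match fuel with
  | 0 => v
  | n + 1 => if PySem.Int.mod |v| ad ≠ 0 then gnlLoop n ad inc (v + inc) else v

def getNearestLowest (xDistance : Int) (yDistance : Int) : List Int :=
  let incrementorX := -(PySem.Int.floordiv |xDistance| xDistance)
  let incrementorY := -(PySem.Int.floordiv |yDistance| yDistance)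
  if |xDistance| > |yDistance| then
    [gnlLoop (xDistance.natAbs + 1) |yDistance| incrementorX xDistance, yDistance]
  else
    [xDistance, gnlLoop (yDistance.natAbs + 1) |xDistance| incrementorY yDistance]

-- ===== PORT B =====
def getNearestLowest_alt (xDistance : Int) (yDistance : Int) : List Int :=
  let ax := |xDistance|
  let ay := |yDistance|
  if ax > ay then
    let r := PySem.Int.mod ax ay
    [xDistance - (if xDistance > 0 then r else -r), yDistance]
  else
    let r := PySem.Int.mod ay ax
    [xDistance, yDistance - (if yDistance > 0 then r else -r)]

-- ===== PRECONDITION & SPEC =====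
-- Python A raises ZeroDivisionError when either argument is 0; Pre_ excludes exactly those.
def Pre_getNearestLowest (xDistance : Int) (yDistance : Int) : Prop :=
  xDistance ≠ 0 ∧ yDistance ≠ 0
instance (xDistance : Int) (yDistance : Int) : Decidable (Pre_getNearestLowest xDistance yDistance) := by
  unfold Pre_getNearestLowest; infer_instance

def pvWitness_getNearestLowest : Int × Int := (7, 3)

def Spec_getNearestLowest (xDistance : Int) (yDistance : Int) (out : List Int) : Prop := out = getNearestLowest_alt xDistance yDistance
instance (xDistance : Int) (yDistance : Int) (out : List Int) : Decidable (Spec_getNearestLowest xDistance yDistance out) := by unfold Spec_getNearestLowest; infer_instance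

-- ===== CLAIM (what is proved, stated in full; the proofs are below) =====
def Claim_equal_getNearestLowest : Prop := ∀ (xDistance : Int) (yDistance : Int), Dom_getNearestLowest xDistance yDistance → Pre_getNearestLowest xDistance yDistance → Spec_getNearestLowest xDistance yDistance (getNearestLowest xDistance yDistance)

-- ===== LEMMAS AND PROOFS =====

-- downward loop (inc = -1) on a nonnegative value computes v - v % d in steps of one
lemma gnlLoop_pos (d : Int) (hd : 0 < d) :
    ∀ (fuel : Nat) (v : Int), 0 ≤ v → (PySem.Int.mod v d).toNat ≤ fuel →
      gnlLoop fuel d (-1) v = v - PySem.Int.mod v d := by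
  intro fuel
  induction fuel with
  | zero =>
      intro v hv hf
      have h0 : 0 ≤ PySem.Int.mod v d := PySem.Int.mod_nonneg _ hd
      have : PySem.Int.mod v d = 0 := by omega
      simp [gnlLoop, this]
  | succ n ih =>
      intro v hv hf
      show (if PySem.Int.mod |v| d ≠ 0 then gnlLoop n d (-1) (v + -1) else v)
            = v - PySem.Int.mod v d
      rw [abs_of_nonneg hv]
      by_cases h : PySem.Int.mod v d = 0
      · simp [h]
      · rw [if_pos h]
        have hm : PySem.Int.mod v d = v % d := PySem.Int.mod_eq_emod_of_pos hd
        have hr0 : 0 ≤ v % d := Int.emod_nonneg v (by omega)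
        have hrlt : v % d < d := Int.emod_lt_of_pos v hd
        have hv1 : 1 ≤ v := by
          by_contra hc
          have : v = 0 := by omega
          apply h; rw [hm, this]; simp
        have hdecomp := Int.emod_add_mul_ediv v d
        have hstep : (v + -1) % d = v % d - 1 := by
          have he : v + -1 = (v % d - 1) + d * (v / d) := by omega
          rw [he, Int.add_mul_emod_self_left, Int.emod_eq_of_lt (by omega) (by omega)]
        have hms : PySem.Int.mod (v + -1) d = v % d - 1 := by
          rw [PySem.Int.mod_eq_emod_of_pos hd, hstep]
        rw [ih (v + -1) (by omega) (by rw [hms]; omega), hms, hm]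
        ring

-- upward loop is the mirror image of the downward loop
lemma gnlLoop_neg_symm (d : Int) :
    ∀ (fuel : Nat) (v : Int), gnlLoop fuel d 1 v = -(gnlLoop fuel d (-1) (-v)) := by
  intro fuel
  induction fuel with
  | zero => intro v; simp [gnlLoop]
  | succ n ih =>
      intro v
      show (if PySem.Int.mod |v| d ≠ 0 then gnlLoop n d 1 (v + 1) else v) = _
      rw [show gnlLoop (n+1) d (-1) (-v) = (if PySem.Int.mod |(-v)| d ≠ 0 then gnlLoop n d (-1) (-v + -1) else -v) from rfl]
      rw [abs_neg]
      by_cases h : PySem.Int.mod |v| d = 0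
      · simp [h]
      · simp only [h, ne_eq, not_false_iff, if_pos]
        rw [ih (v + 1)]
        ring_nf

-- -(abs(v)//v) is -1 for positive v and 1 for negative v
lemma gnl_incrementor (v : Int) (hv : v ≠ 0) :
    -(PySem.Int.floordiv |v| v) = if 0 < v then -1 else 1 := by
  rcases lt_trichotomy v 0 with h | h | h
  · have hq : PySem.Int.floordiv v (-v) = -1 :=
      (PySem.Int.floordiv_eq_iff_of_pos (by omega)).mpr ⟨by nlinarith, by nlinarith⟩
    rw [if_neg (by omega), abs_of_neg h,
      show PySem.Int.floordiv (-v) v = PySem.Int.floordiv v (-v) by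
        rw [← PySem.Int.floordiv_neg_neg v (-v)]; ring_nf,
      hq]
    ring
  · exact absurd h hv
  · rw [if_pos h, abs_of_pos h, PySem.Int.floordiv_eq_ediv_of_pos h, Int.ediv_self hv]

lemma gnl_emod_le_self (a b : Int) (ha : 0 ≤ a) (hb : 0 < b) : a % b ≤ a := by
  rcases lt_or_ge a b with h | h
  · rw [Int.emod_eq_of_lt ha h]
  · have := Int.emod_lt_of_pos a hb; omega

-- one branch of the equivalence: the larger value v reduced toward 0 until |big| % small == 0
lemma gnl_branch (v d : Int) (hv : v ≠ 0) (hd : 0 < d) :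
    gnlLoop (v.natAbs + 1) d (-(PySem.Int.floordiv |v| v)) v
      = v - (if 0 < v then PySem.Int.mod |v| d else -(PySem.Int.mod |v| d)) := by
  rw [gnl_incrementor v hv]
  rcases lt_trichotomy v 0 with h | h | h
  · rw [if_neg (by omega), if_neg (by omega), gnlLoop_neg_symm, abs_of_neg h]
    have hm : PySem.Int.mod (-v) d = (-v) % d := PySem.Int.mod_eq_emod_of_pos hd
    have h1 : 0 ≤ (-v) % d := Int.emod_nonneg _ (by omega)
    have h2 : (-v) % d < d := Int.emod_lt_of_pos _ hd
    have h3 : (-v) % d ≤ -v := gnl_emod_le_self _ _ (by omega) hd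
    rw [gnlLoop_pos d hd _ (-v) (by omega) (by rw [hm]; omega)]
    ring
  · exact absurd h hv
  · rw [if_pos h, if_pos h, abs_of_pos h]
    have hm : PySem.Int.mod v d = v % d := PySem.Int.mod_eq_emod_of_pos hd
    have h1 : 0 ≤ v % d := Int.emod_nonneg _ (by omega)
    have h2 : v % d < d := Int.emod_lt_of_pos _ hd
    have h3 : v % d ≤ v := gnl_emod_le_self _ _ (by omega) hd
    exact gnlLoop_pos d hd _ v (by omega) (by rw [hm]; omega)

theorem getNearestLowest_spec : Claim_equal_getNearestLowest := by
  intro x y _ hpre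
  obtain ⟨hx, hy⟩ := hpre
  show getNearestLowest x y = getNearestLowest_alt x y
  unfold getNearestLowest getNearestLowest_alt
  by_cases hxy : |x| > |y|
  · simp only [if_pos hxy]
    rw [gnl_branch x |y| hx (abs_pos.mpr hy)]
  · simp only [if_neg hxy]
    rw [gnl_branch y |x| hy (abs_pos.mpr hx)]
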